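-- pv_equiv track=rewrite | github.com/puspeshd/bounding_poly | combined_progv1.py | pan1_template
-- ===== SOURCE A (Python) =====
-- def pan1_template(text_list):
--     name=''
--     fathers_name=''
--     dob=''
--     pan_no=''
--     for i in range(len(text_list)):
--         if(text_list[i].lower().find("name")>-1 and (text_list[i].lower().find("father")==-1 and text_list[i].lower().find("mother")==-1)):
--             name=text_list[i+1]
--         if(text_list[i].lower().find("father")>-1 or text_list[i].lower().find("mother")>-1) and (text_list[i].lower().find("name")>-1):
--             fathers_name=text_list[i+1]
--         if(text_list[i].lower().find("date of birth")>-1):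
--             dob=text_list[i+1]
--         if(text_list[i].replace(" ","").isalnum() and len(text_list[i].replace(" ",""))==10):
--             pan_no=text_list[i]
--     fin_res={"Name":name,"Fathers_name":fathers_name,"DOB":dob,"Pan_no":pan_no}
--     dob=dob.lower().replace("dob","").replace(":","").replace("year of birth","")
--     return(fin_res)
-- ===== SOURCE B (Python) =====
-- def pan1_template(text_list):
--     # Four independent field extractions; each scans from the END and stops at
--     # the first hit, which is the last match of the forward scan in A.
--     def _is_name(s):
--         return "name" in s and "father" not in s and "mother" not in s
--
--     def _is_father(s):
--         return "name" in s and ("father" in s or "mother" in s)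
--
--     def _is_dob(s):
--         return "date of birth" in s
--
--     def _last_next(pred):
--         for i in reversed(range(len(text_list))):
--             if pred(text_list[i].lower()):
--                 return text_list[i + 1]
--         return ''
--
--     pan_no = ''
--     for t in reversed(text_list):
--         c = t.replace(" ", "")
--         if c.isalnum() and len(c) == 10:
--             pan_no = t
--             break
--
--     return {"Name": _last_next(_is_name),
--             "Fathers_name": _last_next(_is_father),
--             "DOB": _last_next(_is_dob),
--             "Pan_no": pan_no}
-- ===== Notes on version B (the rewrite author's own statement) =====
-- stated objective: alternative
-- what changed: A's single forward loop that mutates four fields in one pass is decomposed into four independent backward scans, one per field, each stopping at the first match from the end (= A's last-match-wins); the dict is assembled from the four results.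
import Mathlib
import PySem

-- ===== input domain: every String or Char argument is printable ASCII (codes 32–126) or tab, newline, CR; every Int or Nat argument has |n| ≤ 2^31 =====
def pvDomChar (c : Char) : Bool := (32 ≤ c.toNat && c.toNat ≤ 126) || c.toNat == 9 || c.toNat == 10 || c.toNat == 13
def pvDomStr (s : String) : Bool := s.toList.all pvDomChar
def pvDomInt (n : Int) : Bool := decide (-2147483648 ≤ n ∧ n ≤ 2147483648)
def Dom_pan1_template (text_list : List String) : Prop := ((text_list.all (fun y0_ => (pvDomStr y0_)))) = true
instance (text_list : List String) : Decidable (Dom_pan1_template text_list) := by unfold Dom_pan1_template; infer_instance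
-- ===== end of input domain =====

-- B re-decomposes A's single four-field loop into four independent backward scans
-- (first match from the end = A's last-match-wins); same return value on every
-- input where A returns (Pre_ excludes exactly the inputs where both raise IndexError).

-- ===== PORT A =====
-- one iteration of A's loop: all four fields updated in order, as in the Python body
def pan1A_step (text_list : List String) (st : String × String × String × String) (i : Int) :
    String × String × String × String :=
  let ti := PySem.List.pyGetD text_list i ""
  let lo := PySem.Str.lower ti
  let name := if decide (-1 < PySem.Str.find lo "name") &&
                 (decide (PySem.Str.find lo "father" = -1) && decide (PySem.Str.find lo "mother" = -1))
              then PySem.List.pyGetD text_list (i + 1) "" else st.1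
  let fathers := if (decide (-1 < PySem.Str.find lo "father") || decide (-1 < PySem.Str.find lo "mother")) &&
                    decide (-1 < PySem.Str.find lo "name")
                 then PySem.List.pyGetD text_list (i + 1) "" else st.2.1
  let dob := if decide (-1 < PySem.Str.find lo "date of birth")
             then PySem.List.pyGetD text_list (i + 1) "" else st.2.2.1
  let pan := if PySem.Str.strIsalnum (PySem.Str.replace ti " " "") &&
                decide (PySem.Str.len (PySem.Str.replace ti " " "") = 10)
             then ti else st.2.2.2
  (name, fathers, dob, pan)

def pan1_template (text_list : List String) : List (String × String) :=
  let st := (PySem.List.pyRange 0 (text_list.length : Int)).foldl (pan1A_step text_list) ("", "", "", "")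
  let fin_res := [("Name", st.1), ("Fathers_name", st.2.1), ("DOB", st.2.2.1), ("Pan_no", st.2.2.2)]
  -- A's post-assembly dob scrub is dead code (fin_res is already built); kept as a discarded let
  let _dob := PySem.Str.replace (PySem.Str.replace (PySem.Str.replace (PySem.Str.lower st.2.2.1) "dob" "") ":" "") "year of birth" ""
  fin_res

-- ===== PORT B =====
def pan1B_isName (s : String) : Bool :=
  PySem.Str.isIn "name" s && !PySem.Str.isIn "father" s && !PySem.Str.isIn "mother" s

def pan1B_isFather (s : String) : Bool :=
  PySem.Str.isIn "name" s && (PySem.Str.isIn "father" s || PySem.Str.isIn "mother" s)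

def pan1B_isDob (s : String) : Bool :=
  PySem.Str.isIn "date of birth" s

def pan1B_isPan (t : String) : Bool :=
  let c := PySem.Str.replace t " " ""
  PySem.Str.strIsalnum c && decide (PySem.Str.len c = 10)

-- B's `_last_next`: first index from the end whose lowered text satisfies pred; take the next element
def pan1B_lastNext (text_list : List String) (pred : String → Bool) : String :=
  match (List.range text_list.length).reverse.find?
      (fun i : Nat => pred (PySem.Str.lower (PySem.List.pyGetD text_list (i : Int) ""))) with
  | some i => PySem.List.pyGetD text_list ((i : Int) + 1) ""
  | none => ""

def pan1_template_alt (text_list : List String) : List (String × String) :=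
  let pan_no := (text_list.reverse.find? pan1B_isPan).getD ""
  [("Name", pan1B_lastNext text_list pan1B_isName),
   ("Fathers_name", pan1B_lastNext text_list pan1B_isFather),
   ("DOB", pan1B_lastNext text_list pan1B_isDob),
   ("Pan_no", pan_no)]

-- ===== PRECONDITION & SPEC =====
-- Pre_ excludes exactly the inputs on which the Python A raises IndexError: a final
-- element containing "name" or "date of birth" (lower-cased) makes A read text_list[i+1]
-- past the end.  (B raises there too.)
def Pre_pan1_template (text_list : List String) : Prop :=
  (text_list.getLast?.all (fun s =>
    !PySem.Str.isIn "name" (PySem.Str.lower s) && !PySem.Str.isIn "date of birth" (PySem.Str.lower s))) = true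

instance (text_list : List String) : Decidable (Pre_pan1_template text_list) := by
  unfold Pre_pan1_template; infer_instance

def pvWitness_pan1_template : List String :=
  ["Name", "PUSPESH", "Father's Name", "KUMAR", "Date of Birth", "01/01/1990", "ABCDE1234F"]

def Spec_pan1_template (text_list : List String) (out : List (String × String)) : Prop := out = pan1_template_alt text_list
instance (text_list : List String) (out : List (String × String)) : Decidable (Spec_pan1_template text_list out) := by unfold Spec_pan1_template; infer_instance

-- ===== CLAIM (what is proved, stated in full; the proofs are below) =====
def Claim_equal_pan1_template : Prop := ∀ (text_list : List String), Dom_pan1_template text_list → Pre_pan1_template text_list → Spec_pan1_template text_list (pan1_template text_list)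

-- ===== LEMMAS AND PROOFS =====

-- last-match-wins fold = first match over the reversed index list
lemma foldl_last {ι : Type} (l : List ι) (p : ι → Bool) (f : ι → String) (acc : String) :
    l.foldl (fun a i => if p i then f i else a) acc =
      (match l.reverse.find? p with
       | some i => f i
       | none => acc) := by
  induction l generalizing acc with
  | nil => simp
  | cons x xs ih =>
    simp only [List.foldl_cons, List.reverse_cons, List.find?_append, ih]
    cases h : xs.reverse.find? p with
    | some j => simp [Option.or]
    | none =>
      by_cases hp : p x = true <;> simp [Option.or, List.find?, hp]

lemma findPos_eq_isIn (s sub : String) :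
    decide (-1 < PySem.Str.find s sub) = PySem.Str.isIn sub s := by
  by_cases h : sub.toList <:+: s.toList
  · have h0 : 0 ≤ PySem.Str.find s sub := (PySem.Str.find_nonneg_iff s sub).2 h
    rw [(PySem.Str.isIn_iff_infix sub s).2 h]
    exact decide_eq_true (by omega)
  · have h1 : PySem.Str.find s sub = -1 := (PySem.Str.find_eq_neg_one_iff s sub).2 h
    have h2 : PySem.Str.isIn sub s = false :=
      Bool.eq_false_iff.2 fun hc => h ((PySem.Str.isIn_iff_infix sub s).1 hc)
    rw [h2, h1]
    exact decide_eq_false (by omega)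

lemma findNeg_eq_not_isIn (s sub : String) :
    decide (PySem.Str.find s sub = -1) = !PySem.Str.isIn sub s := by
  by_cases h : sub.toList <:+: s.toList
  · have h0 : 0 ≤ PySem.Str.find s sub := (PySem.Str.find_nonneg_iff s sub).2 h
    rw [(PySem.Str.isIn_iff_infix sub s).2 h]
    exact decide_eq_false (by omega)
  · have h1 : PySem.Str.find s sub = -1 := (PySem.Str.find_eq_neg_one_iff s sub).2 h
    have h2 : PySem.Str.isIn sub s = false :=
      Bool.eq_false_iff.2 fun hc => h ((PySem.Str.isIn_iff_infix sub s).1 hc)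
    rw [h2, h1]
    exact decide_eq_true rfl

-- A's step keeps the four fields independent: each projection of the fold is its own fold
lemma foldA_fst (tl : List String) (l : List Int) (st : String × String × String × String) :
    (l.foldl (pan1A_step tl) st).1 =
      l.foldl (fun a i =>
        if pan1B_isName (PySem.Str.lower (PySem.List.pyGetD tl i "")) then PySem.List.pyGetD tl (i + 1) "" else a) st.1 := by
  induction l generalizing st with
  | nil => rfl
  | cons x xs ih =>
    simp only [List.foldl_cons, ih, pan1A_step, pan1B_isName,
      findPos_eq_isIn, findNeg_eq_not_isIn, Bool.and_assoc]

lemma foldA_father (tl : List String) (l : List Int) (st : String × String × String × String) :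
    (l.foldl (pan1A_step tl) st).2.1 =
      l.foldl (fun a i =>
        if pan1B_isFather (PySem.Str.lower (PySem.List.pyGetD tl i "")) then PySem.List.pyGetD tl (i + 1) "" else a) st.2.1 := by
  induction l generalizing st with
  | nil => rfl
  | cons x xs ih =>
    simp only [List.foldl_cons, ih, pan1A_step, pan1B_isFather,
      findPos_eq_isIn, Bool.and_comm]

lemma foldA_dob (tl : List String) (l : List Int) (st : String × String × String × String) :
    (l.foldl (pan1A_step tl) st).2.2.1 =
      l.foldl (fun a i =>
        if pan1B_isDob (PySem.Str.lower (PySem.List.pyGetD tl i "")) then PySem.List.pyGetD tl (i + 1) "" else a) st.2.2.1 := by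
  induction l generalizing st with
  | nil => rfl
  | cons x xs ih =>
    simp only [List.foldl_cons, ih, pan1A_step, pan1B_isDob, findPos_eq_isIn]
    rfl

lemma foldA_pan (tl : List String) (l : List Int) (st : String × String × String × String) :
    (l.foldl (pan1A_step tl) st).2.2.2 =
      l.foldl (fun a i =>
        if pan1B_isPan (PySem.List.pyGetD tl i "") then PySem.List.pyGetD tl i "" else a) st.2.2.2 := by
  induction l generalizing st with
  | nil => rfl
  | cons x xs ih =>
    simp only [List.foldl_cons, ih, pan1A_step, pan1B_isPan]
    rfl

-- each A-field, folded over range(len), is B's backward first-match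
lemma fieldA_eq_lastNext (tl : List String) (pred : String → Bool) :
    ((List.range tl.length).map (fun k : Nat => (k : Int))).foldl
        (fun a i => if pred (PySem.Str.lower (PySem.List.pyGetD tl i ""))
                    then PySem.List.pyGetD tl (i + 1) "" else a) "" =
      pan1B_lastNext tl pred := by
  rw [List.foldl_map, foldl_last]
  unfold pan1B_lastNext
  rcases h : (List.range tl.length).reverse.find?
      (fun i : Nat => pred (PySem.Str.lower (PySem.List.pyGetD tl (i : Int) ""))) with _ | i <;> rfl

lemma range_map_pyGetD (tl : List String) :
    (List.range tl.length).map (fun k : Nat => PySem.List.pyGetD tl (k : Int) "") = tl := by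
  have h := PySem.List.map_pyGetD_pyRange_zero tl ""
  rw [show PySem.List.len tl = ((tl.length : Nat) : Int) from rfl,
    PySem.List.pyRange_zero_natCast, List.map_map] at h
  simpa [Function.comp_def] using h

lemma panA_eq_panB (tl : List String) :
    ((List.range tl.length).map (fun k : Nat => (k : Int))).foldl
        (fun a i => if pan1B_isPan (PySem.List.pyGetD tl i "")
                    then PySem.List.pyGetD tl i "" else a) "" =
      (tl.reverse.find? pan1B_isPan).getD "" := by
  rw [List.foldl_map, foldl_last]
  rw [show tl.reverse = ((List.range tl.length).map (fun k : Nat => PySem.List.pyGetD tl (k : Int) "")).reverse by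
    rw [range_map_pyGetD], ← List.map_reverse, List.find?_map]
  simp only [Function.comp_def]
  split <;> rename_i heq <;> rw [heq] <;> rfl

-- ===== VERDICT (by name: the statement is the Claim_ definition above) =====
theorem pan1_template_spec : Claim_equal_pan1_template := by
  intro tl _ _
  unfold Spec_pan1_template pan1_template pan1_template_alt
  rw [show ((tl.length : Nat) : Int) = ((tl.length : Nat) : Int) from rfl,
    PySem.List.pyRange_zero_natCast]
  simp only [foldA_fst, foldA_father, foldA_dob, foldA_pan]
  rw [fieldA_eq_lastNext tl pan1B_isName, fieldA_eq_lastNext tl pan1B_isFather,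
    fieldA_eq_lastNext tl pan1B_isDob, panA_eq_panB tl]
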